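-- pv_equiv track=rewrite | github.com/SandWithCheese/Tucil1_13522005 | src/brute_solver.py | find_possible_paths
-- ===== SOURCE A (Python) =====
-- def find_possible_paths(m, paths, sequences, weights):
--     max_path = []
--     max_weight = 0
--     for path in paths:
--         seq = ""
--         for r, c in path:
--             seq += m[r][c]
--
--         weight = 0
--         for s in sequences:
--             if "".join(s) in seq:
--                 weight += weights[sequences.index(s)]
--
--         if weight > max_weight:
--             max_weight = weight
--             max_path = [path]
--         elif weight == max_weight:
--             max_path.append(path)
--
--     return max_path, max_weight
-- ===== SOURCE B (Python) =====
-- def find_possible_paths(m, paths, sequences, weights):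
--     # Table-build / max / filter decomposition instead of A's running-max-with-ties loop.
--     pairs = []
--     for path in paths:
--         seq = ""
--         for r, c in path:
--             seq += m[r][c]
--         weight = 0
--         for s in sequences:
--             if "".join(s) in seq:
--                 weight += weights[sequences.index(s)]
--         pairs.append((path, weight))
--     max_weight = 0
--     for _, w in pairs:
--         if w > max_weight:
--             max_weight = w
--     return [p for p, w in pairs if w == max_weight], max_weight
-- ===== Notes on version B (the rewrite author's own statement) =====
-- stated objective: alternative
-- what changed: Replaces A's single pass that maintains a running best weight with tie-append by three differently-shaped passes: build a (path, weight) table, take the max weight floored at 0, then filter the table for paths attaining it (the per-path matching inner loop is kept, including sequences.index for duplicate sequences).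
-- outside the precondition, e.g. on find_possible_paths([['A']], [[(0, 0)]], [['Z']], []): A returns ([[(0, 0)]], 0), B returns ([[(0, 0)]], 0)
import Mathlib
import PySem

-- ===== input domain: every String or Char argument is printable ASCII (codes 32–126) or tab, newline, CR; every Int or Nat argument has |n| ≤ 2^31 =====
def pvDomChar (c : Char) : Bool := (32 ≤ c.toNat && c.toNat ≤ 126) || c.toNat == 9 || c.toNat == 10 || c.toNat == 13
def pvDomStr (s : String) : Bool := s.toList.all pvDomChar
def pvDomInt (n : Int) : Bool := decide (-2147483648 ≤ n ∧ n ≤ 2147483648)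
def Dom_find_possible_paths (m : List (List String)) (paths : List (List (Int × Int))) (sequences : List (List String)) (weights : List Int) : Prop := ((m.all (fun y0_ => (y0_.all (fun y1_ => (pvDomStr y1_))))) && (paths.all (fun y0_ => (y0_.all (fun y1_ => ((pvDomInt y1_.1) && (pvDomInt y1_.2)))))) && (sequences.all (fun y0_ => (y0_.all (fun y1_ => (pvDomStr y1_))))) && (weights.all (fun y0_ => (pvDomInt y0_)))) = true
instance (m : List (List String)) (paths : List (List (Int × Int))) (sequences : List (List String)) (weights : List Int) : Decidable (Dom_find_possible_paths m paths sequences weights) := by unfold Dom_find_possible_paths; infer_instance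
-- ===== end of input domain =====

-- B replaces A's running-best-with-tie-append loop by three passes (build a (path, weight)
-- table, take the max floored at 0, filter); same cost, different decomposition; return values proved equal.

-- ===== PORT A =====
-- literal transliteration of A: one fold over paths keeping (max_path, max_weight);
-- per path, inner folds build the string and the weight exactly as the Python does.
def find_possible_paths (m : List (List String)) (paths : List (List (Int × Int))) (sequences : List (List String)) (weights : List Int) : (List (List (Int × Int))) × Int :=
  paths.foldl (fun st path =>
    let seq : String := path.foldl (fun acc rc =>
      acc ++ (PySem.List.pyGet? ((PySem.List.pyGet? m rc.1).getD []) rc.2).getD "") ""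
    let weight : Int := sequences.foldl (fun w s =>
      if PySem.Str.isIn (PySem.Str.join "" s) seq then
        w + (PySem.List.pyGet? weights (((PySem.List.index? sequences s).getD 0 : Nat) : Int)).getD 0
      else w) 0
    if weight > st.2 then ([path], weight)
    else if weight == st.2 then (st.1 ++ [path], st.2)
    else st) ([], 0)

-- ===== PORT B =====
-- B's per-path weight helper (the same inner matching loops A runs, factored out)
def pvPathWeight (m : List (List String)) (sequences : List (List String)) (weights : List Int) (path : List (Int × Int)) : Int :=
  let seq : String := path.foldl (fun acc rc =>
    acc ++ (PySem.List.pyGet? ((PySem.List.pyGet? m rc.1).getD []) rc.2).getD "") ""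
  sequences.foldl (fun w s =>
    if PySem.Str.isIn (PySem.Str.join "" s) seq then
      w + (PySem.List.pyGet? weights (((PySem.List.index? sequences s).getD 0 : Nat) : Int)).getD 0
    else w) 0

def find_possible_paths_alt (m : List (List String)) (paths : List (List (Int × Int))) (sequences : List (List String)) (weights : List Int) : (List (List (Int × Int))) × Int :=
  let pairs := paths.map (fun path => (path, pvPathWeight m sequences weights path))
  let mw : Int := pairs.foldl (fun a pw => if pw.2 > a then pw.2 else a) 0
  ((pairs.filter (fun pw => pw.2 == mw)).map (fun pw => pw.1), mw)

-- ===== PRECONDITION & SPEC =====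
-- Pre_ excludes the inputs where the Python raises IndexError: a path coordinate outside m,
-- or a sequence whose weight index is past weights. The second conjunct (len sequences ≤ len weights)
-- also excludes some inputs on which A returns (a sequence past weights that happens never to match):
-- whether a sequence matches depends on the computed path string, which is not a closed-form condition.
def Pre_find_possible_paths (m : List (List String)) (paths : List (List (Int × Int))) (sequences : List (List String)) (weights : List Int) : Prop :=
  (∀ path ∈ paths, ∀ rc ∈ path,
      PySem.Raise.InRange m.length rc.1 ∧
      PySem.Raise.InRange ((PySem.List.pyGet? m rc.1).getD []).length rc.2) ∧
  sequences.length ≤ weights.length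
instance (m : List (List String)) (paths : List (List (Int × Int))) (sequences : List (List String)) (weights : List Int) : Decidable (Pre_find_possible_paths m paths sequences weights) := by unfold Pre_find_possible_paths; infer_instance

def pvWitness_find_possible_paths : List (List String) × (List (List (Int × Int))) × List (List String) × List Int :=
  ([["A", "B"]], [[(0, 0), (0, 1)]], [["A"]], [2])

def Spec_find_possible_paths (m : List (List String)) (paths : List (List (Int × Int))) (sequences : List (List String)) (weights : List Int) (out : (List (List (Int × Int))) × Int) : Prop := out = find_possible_paths_alt m paths sequences weights
instance (m : List (List String)) (paths : List (List (Int × Int))) (sequences : List (List String)) (weights : List Int) (out : (List (List (Int × Int))) × Int) : Decidable (Spec_find_possible_paths m paths sequences weights out) := by unfold Spec_find_possible_paths; infer_instance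

-- ===== CLAIM (what is proved, stated in full; the proofs are below) =====
def Claim_equal_find_possible_paths : Prop := ∀ (m : List (List String)) (paths : List (List (Int × Int))) (sequences : List (List String)) (weights : List Int), Dom_find_possible_paths m paths sequences weights → Pre_find_possible_paths m paths sequences weights → Spec_find_possible_paths m paths sequences weights (find_possible_paths m paths sequences weights)

-- ===== LEMMAS AND PROOFS =====

-- running max of weights, floored at 0 (the quantity both programs maintain)
def pvMx (w : List (Int × Int) → Int) (l : List (List (Int × Int))) : Int :=
  l.foldl (fun a p => if w p > a then w p else a) 0

-- A's loop body, with the weight computation abstracted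
def pvStep (w : List (Int × Int) → Int) (st : (List (List (Int × Int))) × Int) (path : List (Int × Int)) : (List (List (Int × Int))) × Int :=
  let weight := w path
  if weight > st.2 then ([path], weight)
  else if weight == st.2 then (st.1 ++ [path], st.2)
  else st

lemma pvMx_append (w : List (Int × Int) → Int) (l : List (List (Int × Int))) (x : List (Int × Int)) :
    pvMx w (l ++ [x]) = if w x > pvMx w l then w x else pvMx w l := by
  simp [pvMx, List.foldl_append]

lemma pvFoldl_max_le (w : List (Int × Int) → Int) (l : List (List (Int × Int))) :
    ∀ a : Int, a ≤ l.foldl (fun a p => if w p > a then w p else a) a := by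
  induction l with
  | nil => intro a; simp
  | cons x l ih =>
    intro a
    simp only [List.foldl_cons]
    refine le_trans ?_ (ih _)
    split <;> omega

lemma pvLe_mx (w : List (Int × Int) → Int) (l : List (List (Int × Int))) (p : List (Int × Int))
    (hp : p ∈ l) : w p ≤ pvMx w l := by
  unfold pvMx
  generalize (0 : Int) = a
  induction l generalizing a with
  | nil => simp at hp
  | cons x l ih =>
    simp only [List.foldl_cons]
    rcases List.mem_cons.mp hp with h | h
    · subst h
      refine le_trans ?_ (pvFoldl_max_le w l _)
      split <;> omega
    · exact ih h _

-- the loop invariant: after any prefix `done`, A's state is (all paths of `done`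
-- attaining the running max, the running max)
lemma pvLoop (w : List (Int × Int) → Int) :
    ∀ (l done : List (List (Int × Int))),
      l.foldl (pvStep w) (done.filter (fun p => w p == pvMx w done), pvMx w done)
        = ((done ++ l).filter (fun p => w p == pvMx w (done ++ l)), pvMx w (done ++ l)) := by
  intro l
  induction l with
  | nil => intro done; simp
  | cons x l ih =>
    intro done
    have hstep :
        pvStep w (done.filter (fun p => w p == pvMx w done), pvMx w done) x
          = ((done ++ [x]).filter (fun p => w p == pvMx w (done ++ [x])), pvMx w (done ++ [x])) := by
      rw [pvMx_append]
      by_cases h1 : w x > pvMx w done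
      · simp only [pvStep, h1, if_pos]
        have hfd : done.filter (fun p => w p == w x) = [] := by
          apply List.filter_eq_nil_iff.mpr
          intro p hp
          have := pvLe_mx w done p hp
          simp only [beq_iff_eq]
          intro he; omega
        simp [List.filter_append, hfd]
      · by_cases h2 : w x = pvMx w done
        · simp [pvStep, h2, List.filter_append]
        · have h3 : ¬ (w x == pvMx w done) = true := by simp [h2]
          simp [pvStep, h1, List.filter_append, h3]
    calc (x :: l).foldl (pvStep w) (done.filter (fun p => w p == pvMx w done), pvMx w done)
        = l.foldl (pvStep w)
            ((done ++ [x]).filter (fun p => w p == pvMx w (done ++ [x])), pvMx w (done ++ [x])) := by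
          rw [List.foldl_cons, hstep]
      _ = ((done ++ x :: l).filter (fun p => w p == pvMx w (done ++ x :: l)), pvMx w (done ++ x :: l)) := by
          rw [ih (done ++ [x])]; simp

-- A's port is the abstract loop with w := pvPathWeight
lemma pvA_eq (m : List (List String)) (paths : List (List (Int × Int))) (sequences : List (List String)) (weights : List Int) :
    find_possible_paths m paths sequences weights
      = paths.foldl (pvStep (pvPathWeight m sequences weights)) ([], 0) := rfl

lemma pvB_eq (m : List (List String)) (paths : List (List (Int × Int))) (sequences : List (List String)) (weights : List Int) :
    find_possible_paths_alt m paths sequences weights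
      = (paths.filter (fun p => pvPathWeight m sequences weights p == pvMx (pvPathWeight m sequences weights) paths),
         pvMx (pvPathWeight m sequences weights) paths) := by
  simp only [find_possible_paths_alt]
  rw [List.filter_map, List.map_map, List.foldl_map]
  simp [Function.comp_def, pvMx]

-- ===== VERDICT (by name: the statement is the Claim_ definition above) =====
theorem find_possible_paths_spec : Claim_equal_find_possible_paths := by
  intro m paths sequences weights _hDom _hPre
  show find_possible_paths m paths sequences weights = find_possible_paths_alt m paths sequences weights
  rw [pvA_eq, pvB_eq]
  have h := pvLoop (pvPathWeight m sequences weights) paths []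
  simpa [pvMx] using h
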